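-- pv_equiv track=rewrite | github.com/Mehedi-dev-2404/HackLDN_Beacon | myapp/app/services/socratic/chunker.py | chunk_by_paragraphs
-- ===== SOURCE A (Python) =====
-- def chunk_by_paragraphs(text: str, max_paragraphs: int = 3) -> list[str]:
--     if max_paragraphs <= 0:
--         raise ValueError("max_paragraphs must be > 0")
--
--     paragraphs = [part.strip() for part in text.split("\n\n") if part.strip()]
--     if not paragraphs:
--         return []
--
--     chunks: list[str] = []
--     for index in range(0, len(paragraphs), max_paragraphs):
--         chunk = "\n\n".join(paragraphs[index : index + max_paragraphs]).strip()
--         if chunk: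
--             chunks.append(chunk)
--     return chunks
-- ===== SOURCE B (Python) =====
-- def chunk_by_paragraphs(text: str, max_paragraphs: int = 3) -> list[str]:
--     if max_paragraphs <= 0:
--         raise ValueError("max_paragraphs must be > 0")
--
--     chunks: list[str] = []
--     buffer: list[str] = []
--     for part in text.split("\n\n"):
--         paragraph = part.strip()
--         if not paragraph:
--             continue
--         buffer.append(paragraph)
--         if len(buffer) == max_paragraphs:
--             chunks.append("\n\n".join(buffer))
--             buffer = []
--     if buffer:
--         chunks.append("\n\n".join(buffer))
--     return chunks
-- ===== Notes on version B (the rewrite author's own statement) =====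
-- stated objective: alternative
-- what changed: B replaces A's index-stepped slicing over a prebuilt paragraph list with a single pass over the split parts that maintains a running buffer and flushes it into a chunk whenever it reaches max_paragraphs (plus a final flush), with no slice-index computation and no re-strip of joined chunks.
import Mathlib
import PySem

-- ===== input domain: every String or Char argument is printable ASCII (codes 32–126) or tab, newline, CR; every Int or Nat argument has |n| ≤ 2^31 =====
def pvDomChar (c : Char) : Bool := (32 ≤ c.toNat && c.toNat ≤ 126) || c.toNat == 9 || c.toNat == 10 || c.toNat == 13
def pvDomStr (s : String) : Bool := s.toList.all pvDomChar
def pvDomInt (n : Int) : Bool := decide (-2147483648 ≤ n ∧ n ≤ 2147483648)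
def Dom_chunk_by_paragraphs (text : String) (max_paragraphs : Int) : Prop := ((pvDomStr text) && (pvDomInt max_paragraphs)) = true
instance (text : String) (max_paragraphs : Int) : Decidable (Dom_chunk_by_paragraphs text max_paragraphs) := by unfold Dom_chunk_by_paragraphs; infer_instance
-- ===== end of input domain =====

-- B groups the stripped paragraphs with a running buffer in one pass over the split parts
-- (flush on reaching max_paragraphs) instead of A's index-stepped slicing; objective: alternative.

-- ===== PORT A =====
def chunk_by_paragraphs (text : String) (max_paragraphs : Int) : List String :=
  if max_paragraphs ≤ 0 then []  -- Python raises ValueError here; excluded by Pre_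
  else
    let paragraphs := ((((PySem.Str.split? text "\n\n").getD []).filter
        (fun part => decide (PySem.Str.strip part ≠ ""))).map PySem.Str.strip)
    if paragraphs = [] then []
    else
      (PySem.List.pyRange 0 paragraphs.length max_paragraphs).foldl
        (fun chunks index =>
          let chunk := PySem.Str.strip (PySem.Str.join "\n\n"
            (PySem.List.slice paragraphs (some index) (some (index + max_paragraphs))))
          if chunk ≠ "" then chunks ++ [chunk] else chunks) []

-- ===== PORT B =====
def chunk_by_paragraphs_alt (text : String) (max_paragraphs : Int) : List String :=
  if max_paragraphs ≤ 0 then []  -- Python raises ValueError here; excluded by Pre_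
  else
    let r := ((PySem.Str.split? text "\n\n").getD []).foldl
      (fun (s : List String × List String) (part : String) =>
        let paragraph := PySem.Str.strip part
        if paragraph = "" then s
        else
          let buffer := s.2 ++ [paragraph]
          if (buffer.length : Int) = max_paragraphs then
            (s.1 ++ [PySem.Str.join "\n\n" buffer], ([] : List String))
          else (s.1, buffer)) (([] : List String), ([] : List String))
    if r.2 ≠ [] then r.1 ++ [PySem.Str.join "\n\n" r.2] else r.1

-- ===== PRECONDITION & SPEC =====
-- Pre_ excludes exactly max_paragraphs <= 0, where the Python A raises ValueError.
def Pre_chunk_by_paragraphs (text : String) (max_paragraphs : Int) : Prop := 1 ≤ max_paragraphs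
instance (text : String) (max_paragraphs : Int) : Decidable (Pre_chunk_by_paragraphs text max_paragraphs) := by unfold Pre_chunk_by_paragraphs; infer_instance
def pvWitness_chunk_by_paragraphs : String × Int := ("a\n\nb\n\nc", 2)
def Spec_chunk_by_paragraphs (text : String) (max_paragraphs : Int) (out : List String) : Prop := out = chunk_by_paragraphs_alt text max_paragraphs
instance (text : String) (max_paragraphs : Int) (out : List String) : Decidable (Spec_chunk_by_paragraphs text max_paragraphs out) := by unfold Spec_chunk_by_paragraphs; infer_instance

-- ===== CLAIM (what is proved, stated in full; the proofs are below) =====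
def Claim_equal_chunk_by_paragraphs : Prop := ∀ (text : String) (max_paragraphs : Int), Dom_chunk_by_paragraphs text max_paragraphs → Pre_chunk_by_paragraphs text max_paragraphs → Spec_chunk_by_paragraphs text max_paragraphs (chunk_by_paragraphs text max_paragraphs)

-- ===== LEMMAS AND PROOFS =====

theorem pv_dropWhile_append {p : Char → Bool} {xs : List Char} (ys : List Char)
    (hx : List.dropWhile p xs = xs) (hne : xs ≠ []) :
    List.dropWhile p (xs ++ ys) = xs ++ ys := by
  cases xs with
  | nil => exact absurd rfl hne
  | cons c t =>
      have hc : ¬ p (c :: t)[0] := (List.dropWhile_eq_self_iff.mp hx) (by simp)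
      simp at hc
      simp [hc]

theorem pv_strip_props (x : List Char) :
    List.dropWhile PySem.Chars.isspace (PySem.Chars.strip x) = PySem.Chars.strip x ∧
    List.dropWhile PySem.Chars.isspace (PySem.Chars.strip x).reverse = (PySem.Chars.strip x).reverse := by
  constructor
  · cases h : PySem.Chars.strip x with
    | nil => simp
    | cons c cs =>
        -- strip x is a prefix of lstrip x
        have hpre : PySem.Chars.strip x <+: PySem.Chars.lstrip x := by
          have := List.dropWhile_suffix (l := (PySem.Chars.lstrip x).reverse) PySem.Chars.isspace
          simpa [PySem.Chars.strip, PySem.Chars.rstrip] using List.reverse_prefix.mpr this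
        have hself : List.dropWhile PySem.Chars.isspace (PySem.Chars.lstrip x) = PySem.Chars.lstrip x :=
          List.dropWhile_idempotent _ _
        rw [h] at hpre
        obtain ⟨w, hw⟩ := hpre
        have hc : ¬ PySem.Chars.isspace c := by
          have := List.dropWhile_eq_self_iff.mp hself
          rw [← hw] at this
          simpa using this (by simp)
        simp [hc]
  · simp [PySem.Chars.strip, PySem.Chars.rstrip, List.dropWhile_idempotent]

theorem pv_join_props (g : List (List Char)) (hg : g ≠ [])
    (h : ∀ cs ∈ g, List.dropWhile PySem.Chars.isspace cs = cs ∧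
        List.dropWhile PySem.Chars.isspace cs.reverse = cs.reverse ∧ cs ≠ []) :
    List.dropWhile PySem.Chars.isspace (PySem.Chars.join "\n\n".toList g) = PySem.Chars.join "\n\n".toList g ∧
    List.dropWhile PySem.Chars.isspace (PySem.Chars.join "\n\n".toList g).reverse = (PySem.Chars.join "\n\n".toList g).reverse ∧
    PySem.Chars.join "\n\n".toList g ≠ [] := by
  induction g with
  | nil => exact absurd rfl hg
  | cons p rest ih =>
      cases rest with
      | nil =>
          rw [PySem.Chars.join_singleton]
          exact h p (by simp)
      | cons q t =>
          obtain ⟨hp1, hp2, hp3⟩ := h p (by simp)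
          obtain ⟨hj1, hj2, hj3⟩ := ih (by simp) (fun cs hcs => h cs (by simp [hcs]))
          rw [PySem.Chars.join_cons_cons]
          refine ⟨?_, ?_, by simp [hp3]⟩
          · rw [List.append_assoc]
            exact pv_dropWhile_append _ hp1 hp3
          · rw [List.reverse_append, List.reverse_append]
            exact pv_dropWhile_append _ hj2 (by simpa using hj3)

theorem pv_strip_join (g : List String) (hg : g ≠ [])
    (h : ∀ p ∈ g, (List.dropWhile PySem.Chars.isspace p.toList = p.toList ∧
      List.dropWhile PySem.Chars.isspace p.toList.reverse = p.toList.reverse ∧ p ≠ "")) :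
    PySem.Str.strip (PySem.Str.join "\n\n" g) = PySem.Str.join "\n\n" g ∧ PySem.Str.join "\n\n" g ≠ "" := by
  have hj := pv_join_props (g.map String.toList) (by simpa using hg)
    (by
      intro cs hcs
      obtain ⟨p, hp, rfl⟩ := List.mem_map.mp hcs
      obtain ⟨h1, h2, h3⟩ := h p hp
      exact ⟨h1, h2, fun hnil => h3 (String.toList_inj.mp (by rw [hnil]; rfl))⟩)
  have hL : (PySem.Str.join "\n\n" g).toList = PySem.Chars.join "\n\n".toList (g.map String.toList) :=
    PySem.Str.toList_join _ _
  constructor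
  · apply String.toList_inj.mp
    rw [PySem.Str.toList_strip, hL, PySem.Chars.strip, PySem.Chars.lstrip, hj.1,
      PySem.Chars.rstrip, hj.2.1, List.reverse_reverse]
  · intro hcon
    apply hj.2.2
    rw [← hL, hcon]
    rfl

def pvJoin (g : List String) : String := PySem.Str.join "\n\n" g

def refChunks (m : Nat) : List String → List String
  | [] => []
  | p :: t => pvJoin (p :: t.take m) :: refChunks m (t.drop m)
  termination_by l => l.length
  decreasing_by simpa using Nat.lt_succ_of_le (List.length_drop_le m t)

theorem pv_chunk_map (M : Nat) (hM : 0 < M) (ps : List String) :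
    (List.range ((ps.length + M - 1) / M)).map (fun k => pvJoin ((ps.drop (M * k)).take M))
      = refChunks (M - 1) ps := by
  obtain ⟨m, rfl⟩ : ∃ m, M = m + 1 := ⟨M - 1, by omega⟩
  simp only [Nat.add_sub_cancel]
  suffices H : ∀ n (ps : List String), ps.length = n →
      (List.range ((ps.length + m) / (m + 1))).map (fun k => pvJoin ((ps.drop ((m + 1) * k)).take (m + 1)))
        = refChunks m ps by
    have h1 : ps.length + (m + 1) - 1 = ps.length + m := by omega
    rw [h1]; exact H _ ps rfl
  intro n
  induction n using Nat.strong_induction_on with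
  | _ n ih =>
    intro ps hn
    cases ps with
    | nil =>
        rw [show (List.length ([] : List String) + m) / (m + 1) = 0 from
          Nat.div_eq_of_lt (by simp)]
        simp [refChunks]
    | cons p t =>
        have hq : ((p :: t).length + m) / (m + 1) = t.length / (m + 1) + 1 := by
          have h1 : (p :: t).length + m = t.length + (m + 1) := by simp; omega
          rw [h1, Nat.add_div_right _ (by omega)]
        have hq' : ((t.drop m).length + m) / (m + 1) = t.length / (m + 1) := by
          rcases Nat.lt_or_ge t.length m with hlt | hle
          · have h0 : (t.drop m).length = 0 := by simp; omega
            rw [h0, Nat.div_eq_of_lt (by omega), Nat.div_eq_of_lt (by omega)]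
          · have h2 : (t.drop m).length + m = t.length := by simp; omega
            rw [h2]
        rw [hq, List.range_succ_eq_map, List.map_cons, List.map_map]
        simp only [refChunks]
        congr 1
        have hmap : ((fun k => pvJoin (((p :: t).drop ((m + 1) * k)).take (m + 1))) ∘ Nat.succ)
              = (fun k => pvJoin (((t.drop m).drop ((m + 1) * k)).take (m + 1))) := by
            funext k
            simp only [Function.comp_apply]
            congr 2
            rw [List.drop_drop, Nat.mul_succ,
              show (m + 1) * k + (m + 1) = ((m + 1) * k + m) + 1 from by omega,
              List.drop_succ_cons]
            congr 1
            omega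
        rw [hmap, ← hq']
        exact ih (t.drop m).length (by simp only [List.length_drop, ← hn, List.length_cons]; omega) _ rfl

theorem pv_B_loop (M : Nat) (hM : 0 < M) (ps : List String) :
    ∀ (chunks buf : List String), buf.length < M →
    (let r := ps.foldl
        (fun (s : List String × List String) (p : String) =>
          let b := s.2 ++ [p]
          if ((b.length : Int)) = (M : Int) then (s.1 ++ [PySem.Str.join "\n\n" b], ([] : List String))
          else (s.1, b)) (chunks, buf)
     if r.2 ≠ [] then r.1 ++ [PySem.Str.join "\n\n" r.2] else r.1)
      = chunks ++ refChunks (M - 1) (buf ++ ps) := by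
  induction ps with
  | nil =>
      intro chunks buf hbuf
      simp only [List.foldl_nil, List.append_nil]
      cases buf with
      | nil => simp [refChunks]
      | cons b bs =>
          have ht : bs.take (M - 1) = bs := List.take_of_length_le (by simp at hbuf; omega)
          have hd : bs.drop (M - 1) = [] := List.drop_eq_nil_of_le (by simp at hbuf; omega)
          simp [refChunks, ht, hd, pvJoin]
  | cons p t ih =>
      intro chunks buf hbuf
      simp only [List.foldl_cons]
      by_cases hfull : ((buf ++ [p]).length : Int) = (M : Int)
      · rw [if_pos hfull]
        have hlen : (buf ++ [p]).length = M := by exact_mod_cast hfull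
        rw [ih (chunks ++ [PySem.Str.join "\n\n" (buf ++ [p])]) [] hM]
        have hsplit : buf ++ p :: t = (buf ++ [p]) ++ t := by simp
        rw [hsplit]
        cases hbp : buf ++ [p] with
        | nil => simp at hbp
        | cons x xs =>
            rw [hbp] at hlen
            simp only [List.cons_append, refChunks]
            rw [List.take_left' (by simp at hlen; omega), List.drop_left' (by simp at hlen; omega)]
            simp [pvJoin]
      · rw [if_neg hfull]
        have hlt : (buf ++ [p]).length < M := by
          have : (buf ++ [p]).length ≤ M := by simp; omega
          have hne : (buf ++ [p]).length ≠ M := fun hc => hfull (by exact_mod_cast hc)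
          omega
        rw [ih chunks (buf ++ [p]) hlt]
        simp

def pvGood (p : String) : Prop :=
  List.dropWhile PySem.Chars.isspace p.toList = p.toList ∧
  List.dropWhile PySem.Chars.isspace p.toList.reverse = p.toList.reverse ∧ p ≠ ""

theorem pv_A_loop (M : Nat) (hM : 0 < M) (ps : List String) (hps : ps ≠ [])
    (h : ∀ p ∈ ps, pvGood p) :
    (PySem.List.pyRange 0 ps.length (M : Int)).foldl
      (fun chunks index =>
        let chunk := PySem.Str.strip (PySem.Str.join "\n\n"
          (PySem.List.slice ps (some index) (some (index + (M : Int)))))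
        if chunk ≠ "" then chunks ++ [chunk] else chunks) []
      = refChunks (M - 1) ps := by
  have hMpos : (0 : Int) < (M : Int) := by exact_mod_cast hM
  have hstep : ∀ (acc : List String) (i : Int), i ∈ PySem.List.pyRange 0 (ps.length : Int) (M : Int) →
      (fun chunks index =>
        let chunk := PySem.Str.strip (PySem.Str.join "\n\n"
          (PySem.List.slice ps (some index) (some (index + (M : Int)))))
        if chunk ≠ "" then chunks ++ [chunk] else chunks) acc i
      = acc ++ [PySem.Str.join "\n\n" (PySem.List.slice ps (some i) (some (i + (M : Int))))] := by
    intro acc i hi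
    obtain ⟨h0, hlt, -⟩ := (PySem.List.mem_pyRange_iff_of_pos hMpos i).mp hi
    obtain ⟨j, rfl⟩ := Int.eq_ofNat_of_zero_le h0
    have hj : j < ps.length := by exact_mod_cast hlt
    have hslice : PySem.List.slice ps (some (j : Int)) (some ((j : Int) + (M : Int)))
        = (ps.drop j).take M := by
      rw [show ((j : Int) + (M : Int)) = ((j + M : Nat) : Int) from by push_cast; ring,
        PySem.List.slice_natCast]
      congr 1
      omega
    have hg : (ps.drop j).take M ≠ [] := by
      simp [List.take_eq_nil_iff, List.drop_eq_nil_iff]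
      omega
    have helems : ∀ q ∈ (ps.drop j).take M, pvGood q := fun q hq =>
      h q (List.mem_of_mem_drop (List.mem_of_mem_take hq))
    obtain ⟨hs1, hs2⟩ := pv_strip_join _ hg (fun p hp => helems p hp)
    simp only [hslice, hs1, if_pos hs2]
  rw [PySem.List.foldl_congr_mem _ _ _ _ hstep, PySem.List.foldl_append_singleton_eq_map, List.nil_append]
  rw [PySem.List.pyRange_of_pos _ _ hMpos, if_pos (by
    cases ps with | nil => exact absurd rfl hps | cons a b => exact_mod_cast Nat.succ_pos _),
    List.map_map]
  have hmapeq : ∀ k : Nat, ((fun index => PySem.Str.join "\n\n"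
        (PySem.List.slice ps (some index) (some (index + (M : Int))))) ∘ (fun k : Nat => 0 + (M : Int) * (k : Int))) k
      = (fun k : Nat => pvJoin ((ps.drop (M * k)).take M)) k := by
    intro k
    simp only [Function.comp_apply, zero_add]
    have h1 : ((M : Int) * (k : Int)) = ((M * k : Nat) : Int) := by push_cast; ring
    rw [h1, show ((M * k : Nat) : Int) + (M : Int) = ((M * k + M : Nat) : Int) from by push_cast; ring,
      PySem.List.slice_natCast]
    have h2 : M * k + M - M * k = M := by omega
    rw [h2]
    rfl
  rw [List.map_congr_left (fun k _ => hmapeq k)]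
  have hq : (((ps.length : Int) - 0 + (M : Int) - 1) / (M : Int)).toNat = (ps.length + M - 1) / M := by
    rw [show ((ps.length : Int) - 0 + (M : Int) - 1) = ((ps.length + M - 1 : Nat) : Int) from by
      push_cast [Nat.cast_sub (by omega : 1 ≤ ps.length + M)]; ring]
    rw [← Int.natCast_ediv]
    exact Int.toNat_natCast _
  rw [hq]
  exact pv_chunk_map M hM ps


theorem pv_main (M : Nat) (hM : 0 < M) (parts : List String) :
    (if ((parts.filter (fun part => decide (PySem.Str.strip part ≠ ""))).map PySem.Str.strip) = [] then []
     else
       (PySem.List.pyRange 0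
           (((parts.filter (fun part => decide (PySem.Str.strip part ≠ ""))).map PySem.Str.strip).length : Int)
           ((M : Nat) : Int)).foldl
         (fun chunks index =>
           let chunk := PySem.Str.strip (PySem.Str.join "\n\n"
             (PySem.List.slice ((parts.filter (fun part => decide (PySem.Str.strip part ≠ ""))).map PySem.Str.strip)
               (some index) (some (index + ((M : Nat) : Int)))))
           if chunk ≠ "" then chunks ++ [chunk] else chunks) [])
    = (let r := parts.foldl
          (fun (s : List String × List String) (part : String) =>
            let paragraph := PySem.Str.strip part
            if paragraph = "" then s
            else
              let buffer := s.2 ++ [paragraph]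
              if (buffer.length : Int) = ((M : Nat) : Int) then
                (s.1 ++ [PySem.Str.join "\n\n" buffer], ([] : List String))
              else (s.1, buffer)) (([] : List String), ([] : List String))
       if r.2 ≠ [] then r.1 ++ [PySem.Str.join "\n\n" r.2] else r.1) := by
  set ps := ((parts.filter (fun part => decide (PySem.Str.strip part ≠ ""))).map PySem.Str.strip) with hps
  show _ = (if (parts.foldl _ (([] : List String), ([] : List String))).2 ≠ [] then _ else _)
  by_cases h0 : ps = []
  · rw [if_pos h0]
    have hall : ∀ part ∈ parts, PySem.Str.strip part = "" := by
      intro part hpart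
      by_contra hne
      have hmem : PySem.Str.strip part ∈ ps := by
        rw [hps]
        exact List.mem_map_of_mem (List.mem_filter.mpr ⟨hpart, by simpa using hne⟩)
      simp [h0] at hmem
    have hfold : parts.foldl
        (fun (s : List String × List String) (part : String) =>
          let paragraph := PySem.Str.strip part
          if paragraph = "" then s
          else
            let buffer := s.2 ++ [paragraph]
            if (buffer.length : Int) = ((M : Nat) : Int) then
              (s.1 ++ [PySem.Str.join "\n\n" buffer], ([] : List String))
            else (s.1, buffer)) (([] : List String), ([] : List String))
        = (([] : List String), ([] : List String)) := by
      rw [PySem.List.foldl_congr_mem _ _ (fun s _ => s) _ (fun acc x hx => by simp [hall x hx])]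
      exact PySem.List.foldl_ignore _ _
    rw [hfold]
    simp
  · rw [if_neg h0]
    have hgood : ∀ p ∈ ps, pvGood p := by
      intro p hp
      rw [hps] at hp
      obtain ⟨part, hpart, rfl⟩ := List.mem_map.mp hp
      have h3 : PySem.Str.strip part ≠ "" := by simpa using (List.mem_filter.mp hpart).2
      refine ⟨?_, ?_, h3⟩
      · rw [PySem.Str.toList_strip]; exact (pv_strip_props part.toList).1
      · rw [PySem.Str.toList_strip]; exact (pv_strip_props part.toList).2
    rw [pv_A_loop M hM ps h0 hgood]
    have hfold1 : parts.foldl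
        (fun (s : List String × List String) (part : String) =>
          let paragraph := PySem.Str.strip part
          if paragraph = "" then s
          else
            let buffer := s.2 ++ [paragraph]
            if (buffer.length : Int) = ((M : Nat) : Int) then
              (s.1 ++ [PySem.Str.join "\n\n" buffer], ([] : List String))
            else (s.1, buffer)) (([] : List String), ([] : List String))
        = ps.foldl
            (fun (s : List String × List String) (p : String) =>
              let b := s.2 ++ [p]
              if ((b.length : Int)) = ((M : Nat) : Int) then
                (s.1 ++ [PySem.Str.join "\n\n" b], ([] : List String))
              else (s.1, b)) (([] : List String), ([] : List String)) := by
      calc parts.foldl _ (([] : List String), ([] : List String))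
          = (parts.map PySem.Str.strip).foldl
              (fun (s : List String × List String) (p : String) =>
                if p = "" then s
                else
                  if ((s.2 ++ [p]).length : Int) = ((M : Nat) : Int) then
                    (s.1 ++ [PySem.Str.join "\n\n" (s.2 ++ [p])], ([] : List String))
                  else (s.1, s.2 ++ [p])) (([] : List String), ([] : List String)) :=
            (List.foldl_map).symm
        _ = (parts.map PySem.Str.strip).foldl
              (fun (s : List String × List String) (p : String) =>
                if p ≠ "" then
                  (if ((s.2 ++ [p]).length : Int) = ((M : Nat) : Int) then
                    (s.1 ++ [PySem.Str.join "\n\n" (s.2 ++ [p])], ([] : List String))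
                  else (s.1, s.2 ++ [p]))
                else s) (([] : List String), ([] : List String)) :=
            PySem.List.foldl_congr_mem _ _ _ _
              (fun acc x _ => by by_cases hx : x = "" <;> simp [hx])
        _ = ((parts.map PySem.Str.strip).filter (fun p => decide (p ≠ ""))).foldl
              (fun (s : List String × List String) (p : String) =>
                if ((s.2 ++ [p]).length : Int) = ((M : Nat) : Int) then
                  (s.1 ++ [PySem.Str.join "\n\n" (s.2 ++ [p])], ([] : List String))
                else (s.1, s.2 ++ [p])) (([] : List String), ([] : List String)) :=
            PySem.List.foldl_ite_eq_foldl_filter (fun p => p ≠ "") _ _ _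
        _ = ps.foldl _ (([] : List String), ([] : List String)) := by
            rw [hps, List.filter_map]
            rfl
    rw [hfold1]
    have hB := pv_B_loop M hM ps [] [] (by simpa using hM)
    simp only [List.nil_append] at hB
    exact hB.symm

-- ===== VERDICT (by name: the statement is the Claim_ definition above) =====
theorem chunk_by_paragraphs_spec : Claim_equal_chunk_by_paragraphs := by
  intro text m hdom hpre
  unfold Spec_chunk_by_paragraphs
  have hm1 : (1 : Int) ≤ m := hpre
  obtain ⟨M, rfl⟩ : ∃ M : Nat, ((M : Nat) : Int) = m := ⟨m.toNat, Int.toNat_of_nonneg (by omega)⟩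
  have hM : 0 < M := by exact_mod_cast hm1
  have hnotle : ¬ (((M : Nat) : Int) ≤ 0) := by exact_mod_cast not_le.mpr (by exact_mod_cast hM)
  unfold chunk_by_paragraphs chunk_by_paragraphs_alt
  rw [if_neg hnotle, if_neg hnotle]
  exact pv_main M hM ((PySem.Str.split? text "\n\n").getD [])
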